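-- pv_equiv track=rewrite | github.com/Croway/camel-forage | website/macros/forage_catalog.py | _render_entries_table
-- ===== SOURCE A (Python) =====
-- def _render_entries_table(entries, tag=None):
--     if tag:
--         entries = [e for e in entries if e.get("configTag", "").upper() == tag.upper()]
--
--     if not entries:
--         return "*No properties available.*"
--
--     common = [e for e in entries if e.get("configTag", "").upper() == "COMMON"]
--     security = [e for e in entries if e.get("configTag", "").upper() == "SECURITY"]
--     advanced = [e for e in entries if e.get("configTag", "").upper() == "ADVANCED"]
--     other = [e for e in entries if e.get("configTag", "").upper() not in ("COMMON", "SECURITY", "ADVANCED")]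
--
--     lines = []
--
--     if tag:
--         # Single tag requested, render flat table
--         _append_table(lines, entries)
--     else:
--         # Group by tag
--         if common:
--             _append_table(lines, common)
--         if security:
--             lines.append("")
--             lines.append("**Security**")
--             lines.append("")
--             _append_table(lines, security)
--         if advanced:
--             lines.append("")
--             lines.append("**Advanced**")
--             lines.append("")
--             _append_table(lines, advanced)
--         if other:
--             _append_table(lines, other)
--
--     return "\n".join(lines)
--
-- def _append_table(lines, entries, indent=""):
--     lines.append(f"{indent}| Property | Description | Type | Default | Required |")
--     lines.append(f"{indent}|---|---|---|---|---|")
--     for e in entries: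
--         name = f'`{e["name"]}`'
--         desc = e.get("description", "")
--         type_ = f'`{e.get("type", "string")}`'
--         default = f'`{e["defaultValue"]}`' if e.get("defaultValue") else ""
--         required = "Yes" if e.get("required") else ""
--         lines.append(f"{indent}| {name} | {desc} | {type_} | {default} | {required} |")
-- ===== SOURCE B (Python) =====
-- def _render_entries_table(entries, tag=None):
--     if tag:
--         entries = [e for e in entries if e.get("configTag", "").upper() == tag.upper()]
--         if not entries:
--             return "*No properties available.*"
--         return "\n".join(_table(entries))
--     if not entries:
--         return "*No properties available.*"
--     common, security, advanced, other = [], [], [], []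
--     buckets = {"COMMON": common, "SECURITY": security, "ADVANCED": advanced}
--     for e in entries:
--         buckets.get(e.get("configTag", "").upper(), other).append(e)
--     out = []
--     if common:
--         out += _table(common)
--     if security:
--         out += ["", "**Security**", ""] + _table(security)
--     if advanced:
--         out += ["", "**Advanced**", ""] + _table(advanced)
--     if other:
--         out += _table(other)
--     return "\n".join(out)
--
-- def _table(entries):
--     return ["| Property | Description | Type | Default | Required |",
--             "|---|---|---|---|---|"] + [_row(e) for e in entries]
--
-- def _row(e):
--     default = f'`{e["defaultValue"]}`' if e.get("defaultValue") else ""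
--     required = "Yes" if e.get("required") else ""
--     return f'| `{e["name"]}` | {e.get("description", "")} | `{e.get("type", "string")}` | {default} | {required} |'
-- ===== Notes on version B (the rewrite author's own statement) =====
-- stated objective: simpler
-- what changed: B replaces A's four separate filter passes over the entries by a single bucketing pass (a dict of category lists) and builds the result by concatenating per-section line blocks (headers plus mapped rows) instead of appending line by line to one shared lines list, with an early flat-table return for the tag case.
import Mathlib
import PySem

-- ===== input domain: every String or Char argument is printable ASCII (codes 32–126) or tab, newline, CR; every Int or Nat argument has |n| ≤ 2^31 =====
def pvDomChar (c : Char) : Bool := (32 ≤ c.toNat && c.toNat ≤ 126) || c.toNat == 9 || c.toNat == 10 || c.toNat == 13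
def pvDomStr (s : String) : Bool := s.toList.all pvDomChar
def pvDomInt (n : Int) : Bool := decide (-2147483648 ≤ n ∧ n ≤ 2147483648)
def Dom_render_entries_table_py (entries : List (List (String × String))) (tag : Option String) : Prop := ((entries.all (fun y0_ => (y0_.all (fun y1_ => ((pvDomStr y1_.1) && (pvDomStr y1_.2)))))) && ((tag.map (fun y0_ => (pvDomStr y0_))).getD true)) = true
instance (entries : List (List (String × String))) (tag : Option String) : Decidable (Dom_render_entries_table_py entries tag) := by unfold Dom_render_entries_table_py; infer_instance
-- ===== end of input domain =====

-- B replaces A's four filter passes by a single grouping pass and builds the output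
-- by concatenating per-section line blocks instead of appending to one shared lines list (objective: simpler).

-- shared dict primitives (entries are Python dicts = assoc lists, first-match lookup)
def pvGet? (e : List (String × String)) (k : String) : Option String :=
  (e.find? (fun p => p.1 == k)).map Prod.snd

def pvGetD (e : List (String × String)) (k d : String) : String :=
  (pvGet? e k).getD d

-- e.get("configTag", "").upper()
def pvCat (e : List (String × String)) : String :=
  PySem.Str.upper (pvGetD e "configTag" "")

-- Python truthiness of the `tag` argument (None and "" are falsy)
def pvTruthy : Option String → Bool
  | some t => !(t == "")
  | none => false

def pvTagUpper (tag : Option String) : String := PySem.Str.upper (tag.getD "")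

-- ===== PORT A =====
-- the row line _append_table builds for one entry; e["name"] is total here via getD ""
-- (a missing "name" key is a Python KeyError, excluded by Pre_)
def pvRowA (indent : String) (e : List (String × String)) : String :=
  let name := "`" ++ pvGetD e "name" "" ++ "`"
  let desc := pvGetD e "description" ""
  let type_ := "`" ++ pvGetD e "type" "string" ++ "`"
  let default := if !((pvGet? e "defaultValue").getD "" == "") then "`" ++ (pvGet? e "defaultValue").getD "" ++ "`" else ""
  let required := if !((pvGet? e "required").getD "" == "") then "Yes" else ""
  indent ++ "| " ++ name ++ " | " ++ desc ++ " | " ++ type_ ++ " | " ++ default ++ " | " ++ required ++ " |"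

-- _append_table: append the two header lines, then one row per entry, to `lines`
def pvAppendTable (lines : List String) (entries : List (List (String × String))) (indent : String) : List String :=
  let lines := lines ++ [indent ++ "| Property | Description | Type | Default | Required |",
                         indent ++ "|---|---|---|---|---|"]
  entries.foldl (fun acc e => acc ++ [pvRowA indent e]) lines

def render_entries_table_py (entries : List (List (String × String))) (tag : Option String) : String :=
  let entries := if pvTruthy tag then entries.filter (fun e => pvCat e == pvTagUpper tag) else entries
  if entries.isEmpty then "*No properties available.*"
  else
    let common := entries.filter (fun e => pvCat e == "COMMON")
    let security := entries.filter (fun e => pvCat e == "SECURITY")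
    let advanced := entries.filter (fun e => pvCat e == "ADVANCED")
    let other := entries.filter (fun e => !(pvCat e == "COMMON" || pvCat e == "SECURITY" || pvCat e == "ADVANCED"))
    let lines : List String := []
    let lines :=
      if pvTruthy tag then pvAppendTable lines entries ""
      else
        let lines := if !common.isEmpty then pvAppendTable lines common "" else lines
        let lines := if !security.isEmpty then pvAppendTable (lines ++ ["", "**Security**", ""]) security "" else lines
        let lines := if !advanced.isEmpty then pvAppendTable (lines ++ ["", "**Advanced**", ""]) advanced "" else lines
        let lines := if !other.isEmpty then pvAppendTable lines other "" else lines
        lines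
    PySem.Str.join "\n" lines

-- ===== PORT B =====
def pvRowB (e : List (String × String)) : String :=
  let default := if !((pvGet? e "defaultValue").getD "" == "") then "`" ++ (pvGet? e "defaultValue").getD "" ++ "`" else ""
  let required := if !((pvGet? e "required").getD "" == "") then "Yes" else ""
  "| `" ++ pvGetD e "name" "" ++ "` | " ++ pvGetD e "description" "" ++ " | `" ++ pvGetD e "type" "string" ++ "` | " ++ default ++ " | " ++ required ++ " |"

def pvTableB (entries : List (List (String × String))) : List String :=
  ["| Property | Description | Type | Default | Required |", "|---|---|---|---|---|"]
    ++ entries.map pvRowB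

-- the single bucketing pass (common, security, advanced, other)
def pvGroupStep
    (acc : List (List (String × String)) × List (List (String × String)) × List (List (String × String)) × List (List (String × String)))
    (e : List (String × String)) :
    List (List (String × String)) × List (List (String × String)) × List (List (String × String)) × List (List (String × String)) :=
  let c := pvCat e
  if c == "COMMON" then (acc.1 ++ [e], acc.2.1, acc.2.2.1, acc.2.2.2)
  else if c == "SECURITY" then (acc.1, acc.2.1 ++ [e], acc.2.2.1, acc.2.2.2)
  else if c == "ADVANCED" then (acc.1, acc.2.1, acc.2.2.1 ++ [e], acc.2.2.2)
  else (acc.1, acc.2.1, acc.2.2.1, acc.2.2.2 ++ [e])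

def pvGroupB (entries : List (List (String × String))) :
    List (List (String × String)) × List (List (String × String)) × List (List (String × String)) × List (List (String × String)) :=
  entries.foldl pvGroupStep ([], [], [], [])

def render_entries_table_py_alt (entries : List (List (String × String))) (tag : Option String) : String :=
  if pvTruthy tag then
    let entries := entries.filter (fun e => pvCat e == pvTagUpper tag)
    if entries.isEmpty then "*No properties available.*"
    else PySem.Str.join "\n" (pvTableB entries)
  else if entries.isEmpty then "*No properties available.*"
  else
    let g := pvGroupB entries
    let out :=
      (if !g.1.isEmpty then pvTableB g.1 else [])
      ++ (if !g.2.1.isEmpty then ["", "**Security**", ""] ++ pvTableB g.2.1 else [])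
      ++ (if !g.2.2.1.isEmpty then ["", "**Advanced**", ""] ++ pvTableB g.2.2.1 else [])
      ++ (if !g.2.2.2.isEmpty then pvTableB g.2.2.2 else [])
    PySem.Str.join "\n" out

-- ===== PRECONDITION & SPEC =====
-- Pre_ excludes inputs where some entry that gets rendered (i.e. survives the tag filter)
-- has no "name" key: there Python A raises KeyError (and B raises too).
def Pre_render_entries_table_py (entries : List (List (String × String))) (tag : Option String) : Prop :=
  ∀ e ∈ entries, (pvTruthy tag = false ∨ pvCat e = pvTagUpper tag) → (pvGet? e "name").isSome = true
instance (entries : List (List (String × String))) (tag : Option String) : Decidable (Pre_render_entries_table_py entries tag) := by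
  unfold Pre_render_entries_table_py; infer_instance

def pvWitness_render_entries_table_py : (List (List (String × String))) × Option String :=
  ([[("name", "port"), ("configTag", "security"), ("required", "yes")], [("name", "host")]], none)

def Spec_render_entries_table_py (entries : List (List (String × String))) (tag : Option String) (out : String) : Prop := out = render_entries_table_py_alt entries tag
instance (entries : List (List (String × String))) (tag : Option String) (out : String) : Decidable (Spec_render_entries_table_py entries tag out) := by unfold Spec_render_entries_table_py; infer_instance

-- ===== CLAIM (what is proved, stated in full; the proofs are below) =====
def Claim_equal_render_entries_table_py : Prop := ∀ (entries : List (List (String × String))) (tag : Option String), Dom_render_entries_table_py entries tag → Pre_render_entries_table_py entries tag → Spec_render_entries_table_py entries tag (render_entries_table_py entries tag)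

-- ===== LEMMAS AND PROOFS =====
theorem pv_foldl_append_map {α β : Type} (f : α → β) (l : List α) (init : List β) :
    l.foldl (fun acc e => acc ++ [f e]) init = init ++ l.map f := by
  induction l generalizing init with
  | nil => simp
  | cons e l ih => simp [ih]

theorem pv_rowAB (e : List (String × String)) : pvRowA "" e = pvRowB e := by
  simp only [pvRowA, pvRowB]
  split_ifs <;> (apply String.toList_inj.mp; simp [String.toList_append])

theorem pv_appendTable_eq (lines : List String) (entries : List (List (String × String))) :
    pvAppendTable lines entries "" = lines ++ pvTableB entries := by
  have hmap : entries.map (pvRowA "") = entries.map pvRowB :=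
    List.map_congr_left (fun e _ => pv_rowAB e)
  unfold pvAppendTable pvTableB
  rw [pv_foldl_append_map]
  simp [hmap]

theorem pv_groupB_go (l : List (List (String × String)))
    (c s a o : List (List (String × String))) :
    l.foldl pvGroupStep (c, s, a, o)
    = (c ++ l.filter (fun e => pvCat e == "COMMON"),
       s ++ l.filter (fun e => pvCat e == "SECURITY"),
       a ++ l.filter (fun e => pvCat e == "ADVANCED"),
       o ++ l.filter (fun e => !(pvCat e == "COMMON" || pvCat e == "SECURITY" || pvCat e == "ADVANCED"))) := by
  induction l generalizing c s a o with
  | nil => simp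
  | cons e l ih =>
    simp only [List.foldl_cons]
    by_cases h1 : pvCat e = "COMMON"
    · rw [show pvGroupStep (c, s, a, o) e = (c ++ [e], s, a, o) by simp [pvGroupStep, h1], ih]
      simp [h1]
    · by_cases h2 : pvCat e = "SECURITY"
      · rw [show pvGroupStep (c, s, a, o) e = (c, s ++ [e], a, o) by simp [pvGroupStep, h2], ih]
        simp [h2]
      · by_cases h3 : pvCat e = "ADVANCED"
        · rw [show pvGroupStep (c, s, a, o) e = (c, s, a ++ [e], o) by simp [pvGroupStep, h3], ih]
          simp [h3]
        · rw [show pvGroupStep (c, s, a, o) e = (c, s, a, o ++ [e]) by simp [pvGroupStep, h1, h2, h3], ih]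
          simp [h1, h2, h3]

theorem pv_groupB_eq (l : List (List (String × String))) :
    pvGroupB l
    = (l.filter (fun e => pvCat e == "COMMON"),
       l.filter (fun e => pvCat e == "SECURITY"),
       l.filter (fun e => pvCat e == "ADVANCED"),
       l.filter (fun e => !(pvCat e == "COMMON" || pvCat e == "SECURITY" || pvCat e == "ADVANCED"))) := by
  simpa [pvGroupB] using pv_groupB_go l [] [] [] []

-- ===== VERDICT (by name: the statement is the Claim_ definition above) =====
theorem render_entries_table_py_spec : Claim_equal_render_entries_table_py := by
  intro entries tag _ _
  unfold Spec_render_entries_table_py render_entries_table_py render_entries_table_py_alt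
  cases ht : pvTruthy tag with
  | true =>
    simp only [if_true]
    split
    · rfl
    · simp [pv_appendTable_eq]
  | false =>
    simp only [if_false, Bool.false_eq_true]
    split
    · rfl
    · simp only [pv_groupB_eq, pv_appendTable_eq]
      split_ifs <;> simp_all
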